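-- pv_equiv track=rewrite | github.com/TTsangSC/line_profiler | kernprof.py | pre_parse_single_arg_directive
-- ===== SOURCE A (Python) =====
-- def pre_parse_single_arg_directive(args, flag, sep='--'):
--     """
--     Pre-parse high-priority single-argument directives like `-m module`
--     to emulate the behavior of `python [...]`.
--
--     Examples
--     --------
--     >>> import functools
--     >>> pre_parse = functools.partial(pre_parse_single_arg_directive,
--     ...                               flag='-m')
--
--     Normal parsing:
--
--     >>> pre_parse(['foo', 'bar', 'baz'])
--     (['foo', 'bar', 'baz'], None, [])
--     >>> pre_parse(['foo', 'bar', '-m', 'baz'])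
--     (['foo', 'bar'], 'baz', [])
--     >>> pre_parse(['foo', 'bar', '-m', 'baz', 'foobar'])
--     (['foo', 'bar'], 'baz', ['foobar'])
--
--     Erroneous case:
--
--     >>> pre_parse(['foo', 'bar', '-m'])
--     Traceback (most recent call last):
--       ...
--     ValueError: argument expected for the -m option
--
--     Prevent erroneous consumption of the flag by passing it `'--'`:
--
--     >>> pre_parse(['foo', '--', 'bar', '-m', 'baz'])
--     (['foo', '--'], None, ['bar', '-m', 'baz'])
--     >>> pre_parse(['foo', '-m', 'spam',
--     ...            'eggs', '--', 'bar', '-m', 'baz'])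
--     (['foo'], 'spam', ['eggs', '--', 'bar', '-m', 'baz'])
--     """
--     args = list(args)
--     pre = []
--     post = []
--     try:
--         i_sep = args.index(sep)
--     except ValueError:  # No such element
--         pass
--     else:
--         pre[:] = args[:i_sep]
--         post[:] = args[i_sep + 1:]
--         pre_pre, arg, pre_post = pre_parse_single_arg_directive(pre, flag)
--         if arg is None:
--             assert not pre_post
--             return pre_pre + [sep], arg, post
--         else:
--             return pre_pre, arg, [*pre_post, sep, *post]
--     try:
--         i_flag = args.index(flag)
--     except ValueError:  # No such element
--         return args, None, []
--     if i_flag == len(args) - 1:  # Last element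
--         raise ValueError(f'argument expected for the {flag} option')
--     return args[:i_flag], args[i_flag + 1], args[i_flag + 2:]
-- ===== SOURCE B (Python) =====
-- def pre_parse_single_arg_directive(args, flag, sep='--'):
--     """Flat single-pass re-implementation (no recursion)."""
--     args = list(args)
--     try:
--         i_sep = args.index(sep)
--     except ValueError:
--         region, post, has_sep = args, [], False
--     else:
--         region, post, has_sep = args[:i_sep], args[i_sep + 1:], True
--     try:
--         i_flag = region.index(flag)
--     except ValueError:
--         return (region + [sep], None, post) if has_sep else (args, None, [])
--     if i_flag == len(region) - 1:
--         raise ValueError(f'argument expected for the {flag} option')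
--     head, arg, tail = region[:i_flag], region[i_flag + 1], region[i_flag + 2:]
--     return (head, arg, tail + [sep] + post) if has_sep else (head, arg, tail)
-- ===== Notes on version B (the rewrite author's own statement) =====
-- stated objective: simpler
-- what changed: Replaces A's recursion on the pre-separator prefix (which re-parses it with the hard-coded '--' separator) by one flat pass: split at the first separator once, search the flag once in that region, and assemble the result directly.
-- outside the precondition, e.g. on pre_parse_single_arg_directive(['x', '--', ';'], '--', ';'): A returns (['x', '--', ';'], None, []), B raises ValueError
-- crash fix: When a '--' sits strictly inside the pre-separator region with no flag before it, A raises AssertionError (its recursion re-splits on the hard-coded '--'); B returns the normal parse of the region. — e.g. on pre_parse_single_arg_directive(["--", "x", ";"], "-m", ";"): A raises AssertionError, B returns (["--", "x", ";"], none, [])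
import Mathlib
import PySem

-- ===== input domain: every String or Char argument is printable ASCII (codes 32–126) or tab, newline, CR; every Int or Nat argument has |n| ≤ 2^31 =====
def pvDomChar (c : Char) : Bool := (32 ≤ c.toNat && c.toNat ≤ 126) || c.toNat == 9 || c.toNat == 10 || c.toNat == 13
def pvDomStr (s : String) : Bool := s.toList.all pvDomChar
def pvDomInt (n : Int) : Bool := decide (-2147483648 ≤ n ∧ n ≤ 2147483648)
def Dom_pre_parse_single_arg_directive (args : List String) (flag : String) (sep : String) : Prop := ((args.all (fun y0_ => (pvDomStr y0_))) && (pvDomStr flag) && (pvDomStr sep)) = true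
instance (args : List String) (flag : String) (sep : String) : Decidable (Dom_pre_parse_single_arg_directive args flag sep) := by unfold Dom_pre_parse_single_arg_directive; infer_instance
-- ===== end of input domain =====

-- B replaces A's recursion on the pre-separator prefix by one flat pass (split at the
-- separator once, search the flag once); objective: simpler. Python A copies `args`
-- (`list(args)`) but mutates nothing; equivalence is about the return value.

-- ===== PORT A =====
-- Literal port of A's recursion. Where Python raises ValueError the port returns
-- ([], none, []); those inputs are excluded by Pre_.
def pre_parse_single_arg_directive (args : List String) (flag : String) (sep : String) :
    List String × Option String × List String :=
  match h : PySem.List.index? args sep with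
  | some i_sep =>
      let pre := PySem.List.slice args none (some (i_sep : Int))
      let post := PySem.List.slice args (some ((i_sep : Int) + 1)) none
      match pre_parse_single_arg_directive pre flag "--" with
      | (pre_pre, none, _pre_post) => (pre_pre ++ [sep], none, post)
      | (pre_pre, some arg, pre_post) => (pre_pre, some arg, pre_post ++ [sep] ++ post)
  | none =>
      match PySem.List.index? args flag with
      | none => (args, none, [])
      | some i_flag =>
          if i_flag = args.length - 1 then ([], none, [])  -- Python: raise ValueError (outside Pre_)
          else (PySem.List.slice args none (some (i_flag : Int)),
                some (PySem.List.pyGetD args ((i_flag : Int) + 1) ""),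
                PySem.List.slice args (some ((i_flag : Int) + 2)) none)
termination_by args.length
decreasing_by
  obtain ⟨hk, -, -⟩ := PySem.List.getElem_of_index?_eq_some h
  simp only [PySem.List.slice_to_natCast, List.length_take]
  omega

-- ===== PORT B =====
-- Flat port of B: split once at the separator, search the flag once in the region.
def pre_parse_single_arg_directive_alt (args : List String) (flag : String) (sep : String) :
    List String × Option String × List String :=
  let rps : List String × List String × Bool :=
    match PySem.List.index? args sep with
    | some i_sep => (PySem.List.slice args none (some (i_sep : Int)),
                     PySem.List.slice args (some ((i_sep : Int) + 1)) none, true)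
    | none => (args, [], false)
  let region := rps.1
  let post := rps.2.1
  let has_sep := rps.2.2
  match PySem.List.index? region flag with
  | none => if has_sep then (region ++ [sep], none, post) else (args, none, [])
  | some i_flag =>
      if i_flag = region.length - 1 then ([], none, [])  -- Python: raise ValueError (outside Pre_)
      else
        let head := PySem.List.slice region none (some (i_flag : Int))
        let arg := PySem.List.pyGetD region ((i_flag : Int) + 1) ""
        let tail := PySem.List.slice region (some ((i_flag : Int) + 2)) none
        if has_sep then (head, some arg, tail ++ [sep] ++ post) else (head, some arg, tail)

-- ===== PRECONDITION & SPEC =====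
-- Pre_ excludes (a) inputs where A raises: ValueError when the first occurrence of the
-- flag ends the searched region, AssertionError when a '--' sits strictly inside the
-- pre-separator region with no flag before it; and (b) the corner sep ≠ '--' where the
-- pre-separator region ends in '--' = flag: there A's recursion (hard-coded to
-- '--') returns the region unsplit while B's single flag search raises
-- ValueError, so there is no common value to claim.
def Pre_pre_parse_single_arg_directive (args : List String) (flag : String) (sep : String) : Prop :=
  PySem.List.index? (args.takeWhile (fun a => a != sep)) flag ≠
      some ((args.takeWhile (fun a => a != sep)).length - 1) ∧
  (sep ∈ args →
    PySem.List.index? ((args.takeWhile (fun a => a != sep)).takeWhile (fun a => a != "--")) flag ≠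
        some (((args.takeWhile (fun a => a != sep)).takeWhile (fun a => a != "--")).length - 1) ∧
      (flag ∉ (args.takeWhile (fun a => a != sep)).takeWhile (fun a => a != "--") →
        (args.takeWhile (fun a => a != sep)).length ≤
          ((args.takeWhile (fun a => a != sep)).takeWhile (fun a => a != "--")).length + 1))
instance (args : List String) (flag : String) (sep : String) : Decidable (Pre_pre_parse_single_arg_directive args flag sep) := by unfold Pre_pre_parse_single_arg_directive; infer_instance

def pvWitness_pre_parse_single_arg_directive : List String × String × String :=
  (["foo", "bar", "-m", "baz"], "-m", "--")

-- A raises AssertionError when a '--' sits strictly inside the pre-separator region with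
-- no flag before it (and the flag does not end the region); B returns the normal parse there.
def Raises_pre_parse_single_arg_directive (args : List String) (flag : String) (sep : String) : Prop :=
  sep ∈ args ∧
  flag ∉ (args.takeWhile (fun a => a != sep)).takeWhile (fun a => a != "--") ∧
  ((args.takeWhile (fun a => a != sep)).takeWhile (fun a => a != "--")).length + 1 <
      (args.takeWhile (fun a => a != sep)).length ∧
  PySem.List.index? (args.takeWhile (fun a => a != sep)) flag ≠
      some ((args.takeWhile (fun a => a != sep)).length - 1)
instance (args : List String) (flag : String) (sep : String) : Decidable (Raises_pre_parse_single_arg_directive args flag sep) := by unfold Raises_pre_parse_single_arg_directive; infer_instance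

def pvRaiseWitness_pre_parse_single_arg_directive : List String × String × String :=
  (["--", "x", ";"], "-m", ";")
def pvRaiseWitnessOut_pre_parse_single_arg_directive : List String × Option String × List String :=
  (["--", "x", ";"], none, [])

def Spec_pre_parse_single_arg_directive (args : List String) (flag : String) (sep : String) (out : List String × Option String × List String) : Prop := out = pre_parse_single_arg_directive_alt args flag sep
instance (args : List String) (flag : String) (sep : String) (out : List String × Option String × List String) : Decidable (Spec_pre_parse_single_arg_directive args flag sep out) := by unfold Spec_pre_parse_single_arg_directive; infer_instance

-- ===== CLAIM (what is proved, stated in full; the proofs are below) =====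
def Claim_equal_pre_parse_single_arg_directive : Prop := ∀ (args : List String) (flag : String) (sep : String), Dom_pre_parse_single_arg_directive args flag sep → Pre_pre_parse_single_arg_directive args flag sep → Spec_pre_parse_single_arg_directive args flag sep (pre_parse_single_arg_directive args flag sep)

def Claim_raises_pre_parse_single_arg_directive : Prop := (∀ (args : List String) (flag : String) (sep : String), Dom_pre_parse_single_arg_directive args flag sep → Raises_pre_parse_single_arg_directive args flag sep → ¬ Pre_pre_parse_single_arg_directive args flag sep) ∧ (Dom_pre_parse_single_arg_directive (pvRaiseWitness_pre_parse_single_arg_directive.1) (pvRaiseWitness_pre_parse_single_arg_directive.2.1) (pvRaiseWitness_pre_parse_single_arg_directive.2.2) ∧ Raises_pre_parse_single_arg_directive (pvRaiseWitness_pre_parse_single_arg_directive.1) (pvRaiseWitness_pre_parse_single_arg_directive.2.1) (pvRaiseWitness_pre_parse_single_arg_directive.2.2) ∧ pre_parse_single_arg_directive_alt (pvRaiseWitness_pre_parse_single_arg_directive.1) (pvRaiseWitness_pre_parse_single_arg_directive.2.1) (pvRaiseWitness_pre_parse_single_arg_directive.2.2) = pvRaiseWitnessOut_pre_parse_single_a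rg_directive)

-- ===== LEMMAS AND PROOFS =====

lemma takeWhile_ne_append (v : String) (P T : List String) (h : v ∉ P) :
    (P ++ v :: T).takeWhile (fun a => a != v) = P := by
  induction P with
  | nil => simp
  | cons x xs ih =>
      simp only [List.mem_cons, not_or] at h
      have hx : (x != v) = true := bne_iff_ne.mpr (fun e => h.1 e.symm)
      simp [hx, ih h.2]

lemma takeWhile_ne_of_not_mem (v : String) (l : List String) (h : v ∉ l) :
    l.takeWhile (fun a => a != v) = l := by
  induction l with
  | nil => rfl
  | cons x xs ih =>
      simp only [List.mem_cons, not_or] at h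
      have hx : (x != v) = true := bne_iff_ne.mpr (fun e => h.1 e.symm)
      simp [hx, ih h.2]

-- A, on a list not containing the separator, reduces to the plain flag search.
lemma A_flat (l : List String) (flag sep : String) (hsep : sep ∉ l) :
    pre_parse_single_arg_directive l flag sep =
      match PySem.List.index? l flag with
      | none => (l, none, [])
      | some i_flag =>
          if i_flag = l.length - 1 then ([], none, [])
          else (PySem.List.slice l none (some (i_flag : Int)),
                some (PySem.List.pyGetD l ((i_flag : Int) + 1) ""),
                PySem.List.slice l (some ((i_flag : Int) + 2)) none) := by
  have h0 : PySem.List.index? l sep = none := (PySem.List.index?_eq_none_iff l sep).mpr hsep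
  rw [pre_parse_single_arg_directive]
  split
  · next heq => rw [h0] at heq; simp at heq
  · rfl

-- A, on a list containing the separator at first index |P|, recurses on P with sep '--'.
lemma A_step (P T : List String) (flag sep : String) (hPn : sep ∉ P) :
    pre_parse_single_arg_directive (P ++ sep :: T) flag sep =
      match pre_parse_single_arg_directive P flag "--" with
      | (pre_pre, none, _pre_post) => (pre_pre ++ [sep], none, T)
      | (pre_pre, some arg, pre_post) => (pre_pre, some arg, pre_post ++ [sep] ++ T) := by
  have hi : PySem.List.index? (P ++ sep :: T) sep = some P.length := by
    rw [(PySem.List.index?_eq_some_iff _ sep P.length)]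
    exact ⟨P, T, rfl, rfl, hPn⟩
  have hpre : PySem.List.slice (P ++ sep :: T) none (some ((P.length : Nat) : Int)) = P := by
    rw [PySem.List.slice_to_natCast]; exact List.take_left ..
  have hpost : PySem.List.slice (P ++ sep :: T) (some (((P.length : Nat) : Int) + 1)) none = T := by
    have hc : (((P.length : Nat) : Int) + 1) = (((P.length + 1 : Nat)) : Int) := by push_cast; ring
    rw [hc, PySem.List.slice_from_natCast, show P ++ sep :: T = (P ++ [sep]) ++ T by simp]
    simpa using (List.drop_left (l₁ := P ++ [sep]) (l₂ := T))
  rw [pre_parse_single_arg_directive]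
  split
  · next i_sep heq =>
      rw [hi] at heq
      have : i_sep = P.length := (Option.some_inj.mp heq).symm
      subst this
      rw [hpre, hpost]
  · next heq => rw [hi] at heq; simp at heq

-- B, with the separator present at first index |P|, in one flat pass.
lemma B_step (P T : List String) (flag sep : String) (hPn : sep ∉ P) :
    pre_parse_single_arg_directive_alt (P ++ sep :: T) flag sep =
      match PySem.List.index? P flag with
      | none => (P ++ [sep], none, T)
      | some i_flag =>
          if i_flag = P.length - 1 then ([], none, [])
          else (PySem.List.slice P none (some (i_flag : Int)),
                some (PySem.List.pyGetD P ((i_flag : Int) + 1) ""),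
                PySem.List.slice P (some ((i_flag : Int) + 2)) none ++ [sep] ++ T) := by
  have hi : PySem.List.index? (P ++ sep :: T) sep = some P.length := by
    rw [(PySem.List.index?_eq_some_iff _ sep P.length)]
    exact ⟨P, T, rfl, rfl, hPn⟩
  have hpre : PySem.List.slice (P ++ sep :: T) none (some ((P.length : Nat) : Int)) = P := by
    rw [PySem.List.slice_to_natCast]; exact List.take_left ..
  have hpost : PySem.List.slice (P ++ sep :: T) (some (((P.length : Nat) : Int) + 1)) none = T := by
    have hc : (((P.length : Nat) : Int) + 1) = (((P.length + 1 : Nat)) : Int) := by push_cast; ring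
    rw [hc, PySem.List.slice_from_natCast, show P ++ sep :: T = (P ++ [sep]) ++ T by simp]
    simpa using (List.drop_left (l₁ := P ++ [sep]) (l₂ := T))
  unfold pre_parse_single_arg_directive_alt
  simp only [hi, hpre, hpost]
  cases hf : PySem.List.index? P flag with
  | none => simp
  | some k => by_cases hk : k = P.length - 1 <;> simp [hk]

-- The two flat shapes agree when the flag's first occurrence is not last.
lemma flat_match_eq (l : List String) (flag : String)
    (h : PySem.List.index? l flag ≠ some (l.length - 1)) :
    (match PySem.List.index? l flag with
      | none => (l, (none : Option String), ([] : List String))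
      | some i_flag =>
          if i_flag = l.length - 1 then ([], none, [])
          else (PySem.List.slice l none (some (i_flag : Int)),
                some (PySem.List.pyGetD l ((i_flag : Int) + 1) ""),
                PySem.List.slice l (some ((i_flag : Int) + 2)) none)) =
    (match PySem.List.index? l flag with
      | none => (l, none, [])
      | some i_flag =>
          (PySem.List.slice l none (some (i_flag : Int)),
            some (PySem.List.pyGetD l ((i_flag : Int) + 1) ""),
            PySem.List.slice l (some ((i_flag : Int) + 2)) none)) := by
  cases hf : PySem.List.index? l flag with
  | none => rfl
  | some k =>
      have : k ≠ l.length - 1 := by intro e; exact h (by rw [hf, e])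
      simp [this]

-- ===== VERDICT (by name: the statement is the Claim_ definition above) =====
theorem pre_parse_single_arg_directive_spec : Claim_equal_pre_parse_single_arg_directive := by
  intro args flag sep _ hpre
  unfold Pre_pre_parse_single_arg_directive at hpre
  unfold Spec_pre_parse_single_arg_directive
  by_cases hsep : sep ∈ args
  case neg =>
    have h0 : PySem.List.index? args sep = none := (PySem.List.index?_eq_none_iff args sep).mpr hsep
    have hR : args.takeWhile (fun a => a != sep) = args := takeWhile_ne_of_not_mem sep args hsep
    rw [A_flat args flag sep hsep]
    unfold pre_parse_single_arg_directive_alt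
    simp only [h0]
    rw [hR] at hpre
    cases hf : PySem.List.index? args flag with
    | none => simp
    | some k =>
        have hk : k ≠ args.length - 1 := by intro e; exact hpre.1 (by rw [hf, e])
        simp [hk]
  case pos =>
    obtain ⟨i, hi⟩ := Option.isSome_iff_exists.mp ((PySem.List.index?_isSome_iff args sep).mpr hsep)
    obtain ⟨P, T, hargs, hlen, hPn⟩ := (PySem.List.index?_eq_some_iff args sep i).mp hi
    subst hargs
    have hR : (P ++ sep :: T).takeWhile (fun a => a != sep) = P := takeWhile_ne_append sep P T hPn
    rw [hR] at hpre
    obtain ⟨hp1, hp2'⟩ := hpre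
    obtain ⟨hp2, hp3⟩ := hp2' hsep
    rw [A_step P T flag sep hPn, B_step P T flag sep hPn]
    by_cases hdd : "--" ∈ P
    · -- P = C ++ "--" :: Q with "--" ∉ C
      obtain ⟨j, hj⟩ := Option.isSome_iff_exists.mp ((PySem.List.index?_isSome_iff P "--").mpr hdd)
      obtain ⟨C, Q, hP, hlenC, hCn⟩ := (PySem.List.index?_eq_some_iff P "--" j).mp hj
      subst hP
      have hC : (C ++ "--" :: Q).takeWhile (fun a => a != "--") = C := takeWhile_ne_append "--" C Q hCn
      rw [hC] at hp2 hp3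
      rw [A_step C Q flag "--" hCn, A_flat C flag "--" hCn]
      by_cases hfC : flag ∈ C
      · -- flag found before the '--'
        obtain ⟨k, hk⟩ := Option.isSome_iff_exists.mp ((PySem.List.index?_isSome_iff C flag).mpr hfC)
        obtain ⟨hklt, -, -⟩ := PySem.List.getElem_of_index?_eq_some hk
        have hkne : k ≠ C.length - 1 := by intro e; exact hp2 (by rw [hk, e])
        have hk1 : k + 1 < C.length := by omega
        have hfP : PySem.List.index? (C ++ "--" :: Q) flag = some k := by
          rw [PySem.List.index?_append_of_mem _ hfC, hk]
        have hkP : k ≠ (C ++ "--" :: Q).length - 1 := by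
          simp only [List.length_append, List.length_cons]; omega
        rw [hfP, hk]
        simp only [if_neg hkne, if_neg hkP]
        have e1 : PySem.List.slice (C ++ "--" :: Q) none (some ((k : Nat) : Int)) =
            PySem.List.slice C none (some ((k : Nat) : Int)) := by
          rw [PySem.List.slice_to_natCast, PySem.List.slice_to_natCast,
            List.take_append_of_le_length (by omega)]
        have e2 : PySem.List.pyGetD (C ++ "--" :: Q) (((k : Nat) : Int) + 1) "" =
            PySem.List.pyGetD C (((k : Nat) : Int) + 1) "" := by
          have hc : (((k : Nat) : Int) + 1) = (((k + 1 : Nat)) : Int) := by push_cast; ring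
          rw [hc, PySem.List.pyGetD_natCast, PySem.List.pyGetD_natCast,
            List.getD_append _ _ _ _ hk1]
        have e3 : PySem.List.slice (C ++ "--" :: Q) (some (((k : Nat) : Int) + 2)) none =
            PySem.List.slice C (some (((k : Nat) : Int) + 2)) none ++ "--" :: Q := by
          have hc : (((k : Nat) : Int) + 2) = (((k + 2 : Nat)) : Int) := by push_cast; ring
          rw [hc, PySem.List.slice_from_natCast, PySem.List.slice_from_natCast,
            List.drop_append_of_le_length (by omega)]
        rw [e1, e2, e3]
        simp
      · -- no flag before the '--': Pre_ forces Q = [] and flag ∉ P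
        have hQ : Q = [] := by
          have := hp3 hfC
          simp only [List.length_append, List.length_cons] at this
          have hlq : Q.length = 0 := by omega
          cases Q with
          | nil => rfl
          | cons a as => simp at hlq
        subst hQ
        have hfd : flag ≠ "--" := by
          intro e; subst e
          apply hp1
          rw [PySem.List.index?_append_singleton_self C "--" hCn]
          simp
        have hfP : PySem.List.index? (C ++ ["--"]) flag = none := by
          rw [PySem.List.index?_eq_none_iff]
          simp [hfC, hfd]
        have hfCn : PySem.List.index? C flag = none := (PySem.List.index?_eq_none_iff C flag).mpr hfC
        rw [show ((C ++ "--" :: []) : List String) = C ++ ["--"] from rfl] at *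
        rw [hfP, hfCn]
    · -- no '--' in P: A's recursion is one flat pass over P as well
      have hC : P.takeWhile (fun a => a != "--") = P := takeWhile_ne_of_not_mem "--" P hdd
      rw [hC] at hp2 hp3
      rw [A_flat P flag "--" hdd]
      rw [flat_match_eq P flag hp1]
      cases hf : PySem.List.index? P flag with
      | none => rfl
      | some k =>
          have hk : k ≠ P.length - 1 := by intro e; exact hp1 (by rw [hf, e])
          simp [hk]

@[simp]
theorem pre_parse_single_arg_directive_raises : Claim_raises_pre_parse_single_arg_directive := by
  unfold Claim_raises_pre_parse_single_arg_directive
  constructor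
  · intro args flag sep _ hr hp
    unfold Raises_pre_parse_single_arg_directive at hr
    unfold Pre_pre_parse_single_arg_directive at hp
    obtain ⟨h1, h2, h3, -⟩ := hr
    obtain ⟨-, hp3⟩ := hp.2 h1
    exact absurd (hp3 h2) (by omega)
  · decide
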